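-- pv_equiv track=rewrite | github.com/SaifLau/r1-stock-bridge | app/music.py | normalize_music_cookie
-- ===== SOURCE A (Python) =====
-- COOKIE_ATTR_NAMES = {
--     "max-age",
--     "expires",
--     "path",
--     "domain",
--     "secure",
--     "httponly",
--     "samesite",
--     "priority",
--     "partitioned",
-- }
--
-- def normalize_music_cookie(raw_cookie: str) -> str:
--     text = raw_cookie.strip()
--     if not text:
--         return ""
--
--     parts: list[str]
--     if ";;" in text:
--         parts = text.split(";;")
--     else:
--         parts = [text]
--
--     cookie_map: dict[str, str] = {}
--     for part in parts:
--         for token in part.split(";"):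
--             item = token.strip()
--             if not item or "=" not in item:
--                 continue
--             name, value = item.split("=", 1)
--             key = name.strip()
--             if not key or key.lower() in COOKIE_ATTR_NAMES:
--                 continue
--             cleaned_value = value.strip()
--             if not cleaned_value:
--                 continue
--             if key in cookie_map:
--                 cookie_map.pop(key, None)
--             cookie_map[key] = cleaned_value
--
--     return "; ".join(f"{key}={value}" for key, value in cookie_map.items())
-- ===== SOURCE B (Python) =====
-- COOKIE_ATTR_NAMES = {
--     "max-age",
--     "expires",
--     "path",
--     "domain",
--     "secure",
--     "httponly",
--     "samesite",
--     "priority",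
--     "partitioned",
-- }
--
--
-- def _parse_token(token: str):
--     """Return (key, value) for a real cookie pair, else None."""
--     item = token.strip()
--     if "=" not in item:
--         return None
--     name, value = item.split("=", 1)
--     key = name.strip()
--     if not key or key.lower() in COOKIE_ATTR_NAMES:
--         return None
--     cleaned = value.strip()
--     if not cleaned:
--         return None
--     return key, cleaned
--
--
-- def normalize_music_cookie(raw_cookie: str) -> str:
--     # One flat split on ";" (";;" boundaries only add empty tokens, which parse to None),
--     # then last-occurrence-wins dedup via a single reverse pass with a seen-set.
--     text = raw_cookie.strip()
--     pairs = [p for t in text.split(";") if (p := _parse_token(t)) is not None]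
--     out = []
--     seen = set()
--     for key, value in reversed(pairs):
--         if key not in seen:
--             seen.add(key)
--             out.append(key + "=" + value)
--     out.reverse()
--     return "; ".join(out)
-- ===== Notes on version B (the rewrite author's own statement) =====
-- stated objective: alternative
-- what changed: B collapses A's two-level split (first on the double separator, then on the single one) into one flat single-separator split, since the extra boundaries only add empty tokens that the filters drop anyway, and replaces A's dict pop-then-reinsert dedup by a single reverse pass with a seen-set, reversing the collected output to keep the same last-occurrence-wins order.
import Mathlib
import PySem

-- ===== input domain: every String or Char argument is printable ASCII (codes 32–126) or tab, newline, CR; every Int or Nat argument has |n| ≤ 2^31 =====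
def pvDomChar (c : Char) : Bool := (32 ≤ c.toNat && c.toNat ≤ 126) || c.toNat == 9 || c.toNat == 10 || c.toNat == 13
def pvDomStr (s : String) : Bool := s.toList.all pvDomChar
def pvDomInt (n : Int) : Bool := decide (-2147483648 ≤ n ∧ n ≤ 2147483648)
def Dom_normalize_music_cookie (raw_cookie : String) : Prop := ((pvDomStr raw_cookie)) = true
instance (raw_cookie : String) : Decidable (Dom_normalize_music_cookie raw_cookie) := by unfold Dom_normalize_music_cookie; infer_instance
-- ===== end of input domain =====

-- B replaces A's nested double-then-single separator split and its dict pop/re-insert dedup by one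
-- flat single-separator split plus a reverse pass with a seen-set (alternative decomposition, same cost).

-- ===== PORT A =====

-- the COOKIE_ATTR_NAMES set literal (shared module constant of both sources)
def pvCookieAttrs : PySem.Set String :=
  PySem.Set.ofList ["max-age", "expires", "path", "domain", "secure",
                    "httponly", "samesite", "priority", "partitioned"]

-- s.split(sep) for sep ≠ "" (exact: PySem.Str.split? is none only for sep = "")
def pvStrSplit (s sep : String) : List String := (PySem.Str.split? s sep).getD []

-- body of A's inner `for token in part.split(";")` loop, step for step
def pvStepA (d : PySem.Dict String String) (token : String) : PySem.Dict String String :=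
  let item := PySem.Str.strip token
  if item = "" ∨ PySem.Str.isIn "=" item = false then d
  else
    -- name, value = item.split("=", 1): "=" ∈ item, so exactly two pieces
    let pieces := (PySem.Str.splitMax? item "=" 1).getD []
    let name := pieces.getD 0 ""
    let value := pieces.getD 1 ""
    let key := PySem.Str.strip name
    if key = "" ∨ pvCookieAttrs.contains (PySem.Str.lower key) = true then d
    else
      let cleaned_value := PySem.Str.strip value
      if cleaned_value = "" then d
      else
        -- if key in cookie_map: cookie_map.pop(key, None)
        let d := if d.contains key then ((d.pop? key).map (·.2)).getD d else d
        d.insert key cleaned_value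

-- f"{key}={value}"
def pvRender (p : String × String) : String := String.ofList (p.1.toList ++ '=' :: p.2.toList)

def normalize_music_cookie (raw_cookie : String) : String :=
  let text := PySem.Str.strip raw_cookie
  if text = "" then ""
  else
    let parts : List String :=
      if PySem.Str.isIn ";;" text then pvStrSplit text ";;" else [text]
    let cookie_map : PySem.Dict String String :=
      parts.foldl (fun d part => (pvStrSplit part ";").foldl pvStepA d) PySem.Dict.empty
    PySem.Str.join "; " (cookie_map.items.map pvRender)

-- ===== PORT B =====

-- _parse_token: (key, value) for a real cookie pair, else None
def pvParseToken (token : String) : Option (String × String) :=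
  let item := PySem.Str.strip token
  if PySem.Str.isIn "=" item = false then none
  else
    let pieces := (PySem.Str.splitMax? item "=" 1).getD []
    let name := pieces.getD 0 ""
    let value := pieces.getD 1 ""
    let key := PySem.Str.strip name
    if key = "" ∨ pvCookieAttrs.contains (PySem.Str.lower key) = true then none
    else
      let cleaned := PySem.Str.strip value
      if cleaned = "" then none
      else some (key, cleaned)

-- body of B's `for key, value in reversed(pairs)` loop
def pvStepB (acc : List String × PySem.Set String) (p : String × String) :
    List String × PySem.Set String :=
  if acc.2.contains p.1 then acc
  else (acc.1 ++ [String.ofList (p.1.toList ++ '=' :: p.2.toList)], acc.2.add p.1)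

def normalize_music_cookie_alt (raw_cookie : String) : String :=
  let text := PySem.Str.strip raw_cookie
  let pairs := (pvStrSplit text ";").filterMap pvParseToken
  let st := pairs.reverse.foldl pvStepB ([], PySem.Set.empty)
  PySem.Str.join "; " st.1.reverse

-- ===== PRECONDITION & SPEC =====
def Spec_normalize_music_cookie (raw_cookie : String) (out : String) : Prop := out = normalize_music_cookie_alt raw_cookie
instance (raw_cookie : String) (out : String) : Decidable (Spec_normalize_music_cookie raw_cookie out) := by unfold Spec_normalize_music_cookie; infer_instance

-- ===== CLAIM (what is proved, stated in full; the proofs are below) =====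
def Claim_equal_normalize_music_cookie : Prop := ∀ (raw_cookie : String), Dom_normalize_music_cookie raw_cookie → Spec_normalize_music_cookie raw_cookie (normalize_music_cookie raw_cookie)

-- ===== LEMMAS AND PROOFS =====

-- ---- 1. characterize PySem's fuel-based splitOn by a structural recursion ----

def pvMsplit (sep : List Char) (s : List Char) : List (List Char) :=
  match s with
  | [] => [[]]
  | c :: t =>
    if sep.isPrefixOf (c :: t) ∧ sep ≠ [] then
      [] :: pvMsplit sep (List.drop (sep.length - 1) t)
    else
      (pvMsplit sep t).modifyHead (c :: ·)
termination_by s.length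
decreasing_by
  all_goals simp [List.length_drop]

theorem pvMsplit_nil (sep : List Char) : pvMsplit sep [] = [[]] := by
  rw [pvMsplit.eq_def]

theorem pvMsplit_cons (sep : List Char) (c : Char) (t : List Char) :
    pvMsplit sep (c :: t) =
      if sep.isPrefixOf (c :: t) ∧ sep ≠ [] then
        [] :: pvMsplit sep (List.drop (sep.length - 1) t)
      else
        (pvMsplit sep t).modifyHead (c :: ·) := by
  rw [pvMsplit.eq_def]

theorem pvGo_eq (sep : List Char) (hsep : sep ≠ []) :
    ∀ (fuel : Nat) (l cur : List Char) (acc : List (List Char)), l.length < fuel →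
      PySem.Chars.splitOn.go sep fuel l cur acc
        = acc.reverse ++ (pvMsplit sep l).modifyHead (cur.reverse ++ ·) := by
  intro fuel
  induction fuel with
  | zero => intro l cur acc h; exact absurd h (by omega)
  | succ n ih =>
    intro l cur acc h
    cases l with
    | nil =>
      simp [PySem.Chars.splitOn.go, pvMsplit_nil]
    | cons c rest =>
      rw [PySem.Chars.splitOn.go]
      by_cases hpre : sep.isPrefixOf (c :: rest) = true
      · simp only [hpre, if_pos]
        have hlen : sep.length ≤ (c :: rest).length := (List.IsPrefix.length_le (List.isPrefixOf_iff_prefix.mp hpre))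
        have hlen1 : 1 ≤ sep.length := by
          cases sep with | nil => exact absurd rfl hsep | cons a b => simp
        have hdrop : (List.drop sep.length (c :: rest)).length < n := by
          rw [List.length_drop]
          simp only [List.length_cons] at h hlen ⊢
          omega
        rw [ih _ _ _ hdrop]
        have hd : List.drop sep.length (c :: rest) = List.drop (sep.length - 1) rest := by
          cases sep with
          | nil => exact absurd rfl hsep
          | cons a b => simp
        rw [pvMsplit_cons, if_pos ⟨hpre, hsep⟩, ← hd]
        simp only [List.reverse_nil, List.nil_append]
        rw [show List.modifyHead (fun x : List Char => x) = id from List.modifyHead_id]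
        simp [List.modifyHead]
      · simp only [hpre, Bool.false_eq_true, if_false]
        rw [ih _ _ _ (by simp at h ⊢; omega)]
        rw [pvMsplit_cons, if_neg (by simp [hpre])]
        rw [List.modifyHead_modifyHead]
        rw [show ((fun x => cur.reverse ++ x) ∘ fun x : List Char => c :: x)
            = fun x => (c :: cur).reverse ++ x from by funext x; simp]

theorem pvSplitOn_eq (s sep : List Char) (hsep : sep ≠ []) :
    PySem.Chars.splitOn s sep = pvMsplit sep s := by
  have h := pvGo_eq sep hsep (s.length + 1) s [] [] (by omega)
  have hid : (List.modifyHead (fun x : List Char => [].reverse ++ x)) = id := by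
    have : (fun x : List Char => [].reverse ++ x) = id := by funext x; simp
    rw [this, List.modifyHead_id]
  rw [PySem.Chars.splitOn, h, hid]
  simp

-- ---- 2. the two concrete splitters and the "collapse ';;' into ';'" lemma ----

def pvS1 : List Char → List (List Char)
  | [] => [[]]
  | c :: t => if c = ';' then [] :: pvS1 t else (pvS1 t).modifyHead (c :: ·)

def pvS2 : List Char → List (List Char)
  | [] => [[]]
  | [c] => [[c]]
  | c :: d :: t =>
    if c = ';' ∧ d = ';' then [] :: pvS2 t
    else (pvS2 (d :: t)).modifyHead (c :: ·)

theorem pvMsplit_semi (s : List Char) : pvMsplit [';'] s = pvS1 s := by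
  induction s with
  | nil => rw [pvMsplit_nil]; rfl
  | cons c t ih =>
    rw [pvMsplit_cons, pvS1]
    by_cases hc : c = ';'
    · subst hc
      rw [if_pos ⟨by simp [List.isPrefixOf], by simp⟩, if_pos rfl]
      simpa using ih
    · rw [if_neg (by
        rintro ⟨hp, -⟩
        simp [List.isPrefixOf] at hp
        exact hc hp.symm), if_neg hc, ih]

theorem pvMsplit_dbl (s : List Char) : pvMsplit [';', ';'] s = pvS2 s := by
  induction s using pvS2.induct with
  | case1 => rw [pvMsplit_nil]; rfl
  | case2 c =>
    rw [pvMsplit_cons]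
    rw [if_neg (by
      rintro ⟨hp, -⟩
      simp [List.isPrefixOf] at hp)]
    rw [pvMsplit_nil]
    rfl
  | case3 c d t hcd ih =>
    obtain ⟨hc, hd⟩ := hcd
    subst hc; subst hd
    rw [pvMsplit_cons, if_pos ⟨by simp [List.isPrefixOf], by simp⟩, pvS2, if_pos ⟨rfl, rfl⟩]
    simpa using ih
  | case4 c d t hcd ih =>
    rw [pvMsplit_cons, if_neg (by
      rintro ⟨hp, -⟩
      simp [List.isPrefixOf] at hp
      exact hcd ⟨hp.1.symm, hp.2.symm⟩), pvS2, if_neg hcd, ih]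

theorem pvS1_ne_nil (s : List Char) : pvS1 s ≠ [] := by
  induction s with
  | nil => simp [pvS1]
  | cons c t ih =>
    rw [pvS1]
    split
    · simp
    · cases h : pvS1 t with
      | nil => exact absurd h ih
      | cons a b => simp

theorem pvS2_ne_nil (s : List Char) : pvS2 s ≠ [] := by
  induction s using pvS2.induct with
  | case1 => simp [pvS2]
  | case2 c => simp [pvS2]
  | case3 c d t h ih => rw [pvS2, if_pos h]; simp
  | case4 c d t h ih =>
    rw [pvS2, if_neg h]
    cases hh : pvS2 (d :: t) with
    | nil => exact absurd hh ih
    | cons a b => simp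

-- "; "-free intercalation of token chunks with an "" separator token between chunks
def pvIc : List (List (List Char)) → List (List Char)
  | [] => []
  | [x] => x
  | x :: y :: ys => x ++ [] :: pvIc (y :: ys)

theorem pvIc_cons_head (tok : List Char) (C : List (List Char)) (M : List (List (List Char))) :
    pvIc ((tok :: C) :: M) = tok :: pvIc (C :: M) := by
  cases M with
  | nil => rfl
  | cons m ms => simp [pvIc]

-- pvS1 of the whole string = the pvS1-chunks of its ";;"-split joined with "" tokens
theorem pvK (s : List Char) : pvS1 s = pvIc ((pvS2 s).map pvS1) := by
  induction s using pvS2.induct with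
  | case1 => rfl
  | case2 c => simp [pvS2, pvIc]
  | case3 c d t h ih =>
    obtain ⟨hc, hd⟩ := h; subst hc; subst hd
    rw [pvS2, if_pos ⟨rfl, rfl⟩]
    obtain ⟨m, ms, hm⟩ : ∃ m ms, (pvS2 t).map pvS1 = m :: ms := by
      cases hh : pvS2 t with
      | nil => exact absurd hh (pvS2_ne_nil t)
      | cons a b => exact ⟨pvS1 a, b.map pvS1, by simp [hh]⟩
    show pvS1 (';' :: ';' :: t) = pvIc (pvS1 [] :: (pvS2 t).map pvS1)
    rw [hm, show pvS1 [] = [[]] from rfl, pvIc]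
    rw [show pvS1 (';' :: ';' :: t) = [] :: [] :: pvS1 t by simp [pvS1], ih, hm]
    rfl
  | case4 c d t h ih =>
    rw [pvS2, if_neg h]
    obtain ⟨ch, rest, hcr⟩ : ∃ ch rest, pvS2 (d :: t) = ch :: rest := by
      cases hh : pvS2 (d :: t) with
      | nil => exact absurd hh (pvS2_ne_nil _)
      | cons a b => exact ⟨a, b, rfl⟩
    rw [hcr]
    simp only [List.modifyHead, List.map_cons]
    by_cases hc : c = ';'
    · subst hc
      rw [show pvS1 (';' :: ch) = [] :: pvS1 ch from by simp [pvS1]]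
      rw [pvIc_cons_head]
      rw [show pvS1 (';' :: d :: t) = [] :: pvS1 (d :: t) from by simp [pvS1]]
      rw [ih, hcr]
      rfl
    · rw [show pvS1 (c :: ch) = (pvS1 ch).modifyHead (c :: ·) from by simp [pvS1, hc]]
      obtain ⟨tk, C, htc⟩ : ∃ tk C, pvS1 ch = tk :: C := by
        cases hh : pvS1 ch with
        | nil => exact absurd hh (pvS1_ne_nil ch)
        | cons a b => exact ⟨a, b, rfl⟩
      rw [htc]
      simp only [List.modifyHead]
      rw [pvIc_cons_head]
      rw [show pvS1 (c :: d :: t) = (pvS1 (d :: t)).modifyHead (c :: ·) from by simp [pvS1, hc]]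
      rw [ih, hcr]
      simp only [List.map_cons, htc]
      rw [pvIc_cons_head]
      rfl

theorem pvFilterMap_pvIc {β : Type} (Q : List Char → Option β) (hQ : Q [] = none) :
    ∀ M : List (List (List Char)), (pvIc M).filterMap Q = M.flatMap (List.filterMap Q) := by
  intro M
  induction M with
  | nil => rfl
  | cons x ys ih =>
    cases ys with
    | nil => simp [pvIc]
    | cons y ys' =>
      rw [pvIc]
      simp only [List.filterMap_append, List.flatMap_cons]
      rw [show List.filterMap Q ([] :: pvIc (y :: ys')) = List.filterMap Q (pvIc (y :: ys')) from by
        simp [hQ]]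
      rw [ih]
      simp

-- ---- 3. string-level split facts ----

theorem pvStrSplit_eq (s sep : String) (hsep : sep.toList ≠ []) :
    pvStrSplit s sep = (pvMsplit sep.toList s.toList).map String.ofList := by
  unfold pvStrSplit
  rw [show PySem.Str.split? s sep
      = Option.map (fun x => List.map String.ofList x) (PySem.Chars.split? s.toList sep.toList) from rfl]
  rw [PySem.Chars.split?]
  rw [if_neg (by simpa [List.isEmpty_iff] using hsep)]
  simp [pvSplitOn_eq _ _ hsep]

-- ---- 4. A's token step = parse-then-dict-step ----

def pvPairStep (d : PySem.Dict String String) (p : String × String) : PySem.Dict String String :=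
  (if d.contains p.1 then ((d.pop? p.1).map (·.2)).getD d else d).insert p.1 p.2

theorem pvStepA_parse (d : PySem.Dict String String) (token : String) :
    pvStepA d token = match pvParseToken token with
      | none => d
      | some p => pvPairStep d p := by
  unfold pvStepA pvParseToken pvPairStep
  dsimp only
  by_cases hst : PySem.Str.strip token = ""
  · rw [hst]
    rw [if_pos (Or.inl rfl),
      if_pos (show PySem.Str.isIn "=" ("" : String) = false from by decide)]
  · split_ifs <;> simp_all

theorem pvFold_tokens_pairs (tokens : List String) (d : PySem.Dict String String) :
    tokens.foldl pvStepA d = (tokens.filterMap pvParseToken).foldl pvPairStep d := by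
  induction tokens generalizing d with
  | nil => rfl
  | cons t ts ih =>
    rw [List.foldl_cons, pvStepA_parse, List.filterMap_cons]
    cases pvParseToken t with
    | none => exact ih d
    | some p => simp [ih]

-- ---- 5. the dict fold computes keepLast ----

def pvKeepLast : List (String × String) → List (String × String)
  | [] => []
  | p :: t => if t.any (fun r => p.1 == r.1) then pvKeepLast t else p :: pvKeepLast t

theorem pvItems_pairStep (d : PySem.Dict String String) (p : String × String) :
    (pvPairStep d p).items = d.items.filter (fun q => !(q.1 == p.1)) ++ [p] := by
  unfold pvPairStep
  by_cases hc : d.contains p.1 = true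
  · rw [if_pos hc]
    obtain ⟨v, hv⟩ : ∃ v, d.get? p.1 = some v := by
      rw [PySem.Dict.contains_eq_isSome_get?] at hc
      exact Option.isSome_iff_exists.mp hc
    rw [PySem.Dict.pop?, hv]
    simp only [Option.map_some, Option.getD_some]
    have hnc : (d.erase p.1).contains p.1 = false := by
      rw [PySem.Dict.contains]
      rw [show (d.erase p.1).items = d.items.filter (fun q => !(q.1 == p.1)) from rfl]
      rw [List.any_filter]
      simp
    rw [PySem.Dict.items_insert_of_not_contains _ _ hnc]
    rfl
  · rw [if_neg hc]
    rw [PySem.Dict.items_insert_of_not_contains _ _ (by simpa using hc)]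
    congr 1
    symm
    rw [List.filter_eq_self]
    intro q hq
    rw [PySem.Dict.contains] at hc
    have h2 : ¬ (d.items.any (fun r => r.1 == p.1) = true) := hc
    rw [List.any_eq_true] at h2
    have h3 : ¬ ((q.1 == p.1) = true) := fun hb => h2 ⟨q, hq, hb⟩
    simpa using h3

theorem pvFold_pairStep_items (ps : List (String × String)) (l : List (String × String)) :
    ∀ d : PySem.Dict String String, d.items = l →
      (ps.foldl pvPairStep d).items
        = l.filter (fun q => !(ps.any (fun r => q.1 == r.1))) ++ pvKeepLast ps := by
  induction ps generalizing l with
  | nil =>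
    intro d hd
    simp [pvKeepLast, hd]
  | cons p t ih =>
    intro d hd
    rw [List.foldl_cons]
    rw [ih (l.filter (fun q => !(q.1 == p.1)) ++ [p]) _ (by rw [pvItems_pairStep, hd])]
    rw [pvKeepLast]
    rw [List.filter_append, List.filter_filter]
    have hcongr : List.filter (fun a => (!(t.any fun r => a.1 == r.1)) && !(a.1 == p.1)) l
        = List.filter (fun q => !((p :: t).any fun r => q.1 == r.1)) l := by
      apply List.filter_congr
      intro a _
      simp only [List.any_cons, Bool.not_or, Bool.and_comm]
    by_cases hmem : t.any (fun r => p.1 == r.1) = true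
    · rw [if_pos hmem]
      rw [show List.filter (fun q => !(t.any fun r => q.1 == r.1)) [p] = [] from by
        simp [List.filter, hmem]]
      rw [List.append_nil, hcongr]
    · rw [if_neg hmem]
      rw [show List.filter (fun q => !(t.any fun r => q.1 == r.1)) [p] = [p] from by
        simp [List.filter, hmem]]
      rw [List.append_assoc, hcongr]
      rfl

-- ---- 6. B's reverse pass with a seen-set computes keepLast too ----

def pvKf (seen : List String) : List (String × String) → List (String × String)
  | [] => []
  | p :: t => if p.1 ∈ seen then pvKf seen t else p :: pvKf (seen ++ [p.1]) t

theorem pvStepB_fold (ps : List (String × String)) :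
    ∀ (out seen : List String),
      (ps.foldl pvStepB (out, seen)).1 = out ++ (pvKf seen ps).map pvRender := by
  induction ps with
  | nil => intro out seen; simp [pvKf]
  | cons p t ih =>
    intro out seen
    rw [List.foldl_cons, pvKf]
    by_cases hmem : p.1 ∈ seen
    · rw [if_pos hmem]
      rw [show pvStepB (out, seen) p = (out, seen) from by
        unfold pvStepB
        rw [if_pos (by simpa [PySem.Set.contains, List.contains_iff_mem] using hmem)]]
      exact ih out seen
    · rw [if_neg hmem]
      rw [show pvStepB (out, seen) p = (out ++ [pvRender p], seen ++ [p.1]) from by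
        unfold pvStepB pvRender
        rw [if_neg (by simpa [PySem.Set.contains, List.contains_iff_mem] using hmem)]
        rw [show PySem.Set.add seen p.1 = seen ++ [p.1] from by
          unfold PySem.Set.add
          rw [if_neg (by simpa [PySem.Set.contains, List.contains_iff_mem] using hmem)]]]
      rw [ih, List.map_cons, List.append_assoc]
      rfl

theorem pvKf_append_last (X : List (String × String)) (q : String × String) :
    ∀ seen : List String,
      pvKf seen (X ++ [q])
        = pvKf seen X ++ (if q.1 ∈ seen ∨ q.1 ∈ X.map Prod.fst then [] else [q]) := by
  induction X with
  | nil =>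
    intro seen
    by_cases h : q.1 ∈ seen
    · simp [pvKf, h]
    · simp [pvKf, h]
  | cons p t ih =>
    intro seen
    rw [List.cons_append, pvKf, pvKf]
    by_cases hp : p.1 ∈ seen
    · rw [if_pos hp, if_pos hp, ih seen]
      congr 1
      have : (q.1 ∈ seen ∨ q.1 ∈ t.map Prod.fst)
          ↔ (q.1 ∈ seen ∨ q.1 ∈ (p :: t).map Prod.fst) := by
        simp only [List.map_cons, List.mem_cons]
        constructor
        · rintro (h | h)
          · exact Or.inl h
          · exact Or.inr (Or.inr h)
        · rintro (h | h | h)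
          · exact Or.inl h
          · exact Or.inl (h ▸ hp)
          · exact Or.inr h
      rw [if_congr this rfl rfl]
    · rw [if_neg hp, if_neg hp, ih (seen ++ [p.1]), List.cons_append]
      congr 2
      have : (q.1 ∈ seen ++ [p.1] ∨ q.1 ∈ t.map Prod.fst)
          ↔ (q.1 ∈ seen ∨ q.1 ∈ (p :: t).map Prod.fst) := by
        simp only [List.mem_append, List.map_cons, List.mem_cons]
        tauto
      rw [if_congr this rfl rfl]

theorem pvKf_rev_keepLast (ps : List (String × String)) :
    ∀ seen : List String,
      (pvKf seen ps.reverse).reverse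
        = (pvKeepLast ps).filter (fun p => !(decide (p.1 ∈ seen))) := by
  induction ps with
  | nil => intro seen; simp [pvKf, pvKeepLast]
  | cons p t ih =>
    intro seen
    rw [List.reverse_cons, pvKf_append_last, List.reverse_append, ih seen, pvKeepLast]
    have hkeys : (p.1 ∈ t.map Prod.fst) ↔ (t.any (fun r => p.1 == r.1) = true) := by
      simp only [List.any_eq_true, List.mem_map, beq_iff_eq]
      constructor
      · rintro ⟨q, hq, h⟩; exact ⟨q, hq, h.symm⟩
      · rintro ⟨q, hq, h⟩; exact ⟨q, hq, h.symm⟩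
    have hrevkeys : (p.1 ∈ t.reverse.map Prod.fst) ↔ (p.1 ∈ t.map Prod.fst) := by
      rw [List.map_reverse, List.mem_reverse]
    by_cases hlater : t.any (fun r => p.1 == r.1) = true
    · rw [if_pos (Or.inr (hrevkeys.mpr (hkeys.mpr hlater))), if_pos hlater]
      simp
    · rw [if_neg hlater]
      by_cases hseen : p.1 ∈ seen
      · rw [if_pos (Or.inl hseen)]
        simp [hseen]
      · rw [if_neg (by
          rintro (h | h)
          · exact hseen h
          · exact hlater (hkeys.mp (hrevkeys.mp h)))]
        simp [hseen]

-- ---- 7. nested fold flattening, pairs equality, glue ----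

theorem pvFold_nested (parts : List String) (init : PySem.Dict String String) :
    parts.foldl (fun d part => (pvStrSplit part ";").foldl pvStepA d) init
      = ((parts.flatMap (fun part => pvStrSplit part ";")).foldl pvStepA init) := by
  induction parts generalizing init with
  | nil => rfl
  | cons p t ih => rw [List.foldl_cons, List.flatMap_cons, List.foldl_append, ih]

def pvQ (cs : List Char) : Option (String × String) := pvParseToken (String.ofList cs)

theorem pvQ_nil : pvQ [] = none := by decide

theorem pvStrSplit_semi (s : String) :
    pvStrSplit s ";" = (pvS1 s.toList).map String.ofList := by
  rw [pvStrSplit_eq s ";" (by simp)]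
  rw [show (";" : String).toList = [';'] from rfl]
  rw [pvMsplit_semi]

theorem pvStrSplit_dbl (s : String) :
    pvStrSplit s ";;" = (pvS2 s.toList).map String.ofList := by
  rw [pvStrSplit_eq s ";;" (by simp)]
  rw [show (";;" : String).toList = [';', ';'] from rfl]
  rw [pvMsplit_dbl]

set_option maxHeartbeats 2000000 in
theorem pvSplit1_filterMap (s : String) :
    (pvStrSplit s ";").filterMap pvParseToken = (pvS1 s.toList).filterMap pvQ := by
  rw [pvStrSplit_semi, List.filterMap_map]
  rw [show (pvParseToken ∘ String.ofList) = pvQ from funext (fun cs => rfl)]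

-- the pair list A's nested ";;"/";" tokens produce = the pair list of the single ";"-split
theorem pvPairs_eq (text : String) :
    ((if PySem.Str.isIn ";;" text = true then pvStrSplit text ";;" else [text]).flatMap
        (fun part => pvStrSplit part ";")).filterMap pvParseToken
      = (pvStrSplit text ";").filterMap pvParseToken := by
  by_cases hin : PySem.Str.isIn ";;" text = true
  · rw [if_pos hin, pvSplit1_filterMap]
    rw [pvStrSplit_dbl]
    rw [List.flatMap_map, List.filterMap_flatMap]
    have hbody : (fun c : List Char =>
          List.filterMap pvParseToken (pvStrSplit (String.ofList c) ";"))
        = fun c => (pvS1 c).filterMap pvQ := by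
      funext c
      rw [show List.filterMap pvParseToken (pvStrSplit (String.ofList c) ";")
          = (pvStrSplit (String.ofList c) ";").filterMap pvParseToken from rfl]
      rw [pvSplit1_filterMap, String.toList_ofList]
    rw [hbody]
    rw [pvK text.toList, pvFilterMap_pvIc pvQ pvQ_nil, List.flatMap_map]
  · rw [if_neg hin]
    rw [List.flatMap_cons, List.flatMap_nil, List.append_nil]

-- ===== VERDICT (by name: the statement is the Claim_ definition above) =====
theorem normalize_music_cookie_spec : Claim_equal_normalize_music_cookie := by
  unfold Claim_equal_normalize_music_cookie Spec_normalize_music_cookie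
  intro raw _
  unfold normalize_music_cookie normalize_music_cookie_alt
  dsimp only
  by_cases hempty : PySem.Str.strip raw = ""
  · rw [if_pos hempty, hempty]
    decide
  · rw [if_neg hempty]
    rw [pvFold_nested, pvFold_tokens_pairs]
    rw [pvPairs_eq (PySem.Str.strip raw)]
    rw [pvFold_pairStep_items _ [] PySem.Dict.empty rfl]
    rw [pvStepB_fold]
    simp only [List.filter_nil, List.nil_append]
    rw [← List.map_reverse, pvKf_rev_keepLast]
    simp [PySem.Set.empty]
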